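-- pv_equiv track=rewrite | github.com/towardsRevolution/Aditya-s-Python-Codes | Bit Manipulation/bitcoin.py | trimTo32Bits
-- ===== SOURCE A (Python) =====
-- def padIntTo32Bits(data):
--     """
--     Takes an integer that can be represented in 32 bits (or less), and returns
--     it as a 32 bit binary string of 0's and 1's.], e.g.:
--
--         padIntTo32Bits(11) = '0b00000000000000000000000000001011'
--         padIntTo32Bits(0x6a09e667) = '0b01101010000010011110011001100111'
--
--     :param data (int): An integer represented in 32 bits or less
--     :pre: data is 32 bits or less
--     :return: A 32 bit binary string
--     """
--     binaryString=bin(data)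
--     zeroPadding=34-len(binaryString)
--     zeroString=""
--     for _ in range(zeroPadding):
--         zeroString=zeroString+"0"
--     for index in range(2,len(binaryString)):
--         zeroString+=binaryString[index]
--     return ("0b"+zeroString)
--
-- def trimTo32Bits(val):
--     """
--     Takes a binary string that may be larger than 32 bits and cut it down to 32
--     bits by removing the extra most significant bits, e.g.:
--
--         trim('0b111111110000010001000100001001101') ==
--             '0b11111110000010001000100001001101'
--
--     :param val (str): A binary string of 32 or greater bits
--     :pre: val is >= 32 bits
--     :return: A trimmed 32 bit binary string
--     """
--     trimmedString=""
--     if(len(val)-34>0):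
--         BitsTrimmed=len(val)-34
--         for index in range(BitsTrimmed+2,len(val)):
--             trimmedString+=val[index]
--         return "0b"+trimmedString
--     else:
--         NonTrimmedString=padIntTo32Bits(int(val,2))
--         return NonTrimmedString
-- ===== SOURCE B (Python) =====
-- def trimTo32Bits(val):
--     if len(val) > 34:
--         return "0b" + val[-32:]
--     return "0b" + bin(int(val, 2))[2:].zfill(32)
-- ===== Notes on version B (the rewrite author's own statement) =====
-- stated objective: simpler
-- what changed: A's two character-copying index loops and the padIntTo32Bits helper with its hand-rolled zero-padding loop are replaced by two closed-form string expressions: slicing val[-32:] for long inputs and bin(int(val,2))[2:].zfill(32) for short ones.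
import Mathlib
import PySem

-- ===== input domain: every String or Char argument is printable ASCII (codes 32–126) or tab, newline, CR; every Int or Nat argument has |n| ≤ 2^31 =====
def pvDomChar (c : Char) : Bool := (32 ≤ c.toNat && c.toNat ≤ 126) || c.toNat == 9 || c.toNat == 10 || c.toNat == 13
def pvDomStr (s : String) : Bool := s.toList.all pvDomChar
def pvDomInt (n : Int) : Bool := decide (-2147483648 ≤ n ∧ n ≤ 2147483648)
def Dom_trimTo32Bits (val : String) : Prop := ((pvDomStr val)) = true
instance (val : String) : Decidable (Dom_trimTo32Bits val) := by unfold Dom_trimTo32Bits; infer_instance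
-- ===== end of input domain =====

-- B replaces A's two character-copying index loops and the padIntTo32Bits helper by two
-- closed-form string expressions (a slice for long inputs, bin()[2:].zfill(32) for short
-- ones); same return value on every input on which A returns.

-- ===== PORT A =====
def padIntTo32BitsChars (data : Int) : List Char :=
  let binaryString := PySem.Int.toBinChars0b data
  let zeroPadding : Int := 34 - (binaryString.length : Int)
  let zeroString := (PySem.List.pyRange 0 zeroPadding 1).foldl
    (fun s _ => s ++ ['0']) ([] : List Char)
  let zeroString := (PySem.List.pyRange 2 (binaryString.length : Int) 1).foldl
    (fun s i => s ++ [PySem.List.pyGetD binaryString i ' ']) zeroString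
  '0' :: 'b' :: zeroString

def trimTo32Bits (val : String) : String :=
  let l := val.toList
  if (l.length : Int) - 34 > 0 then
    let bitsTrimmed : Int := (l.length : Int) - 34
    let trimmedString := (PySem.List.pyRange (bitsTrimmed + 2) (l.length : Int) 1).foldl
      (fun s i => s ++ [PySem.List.pyGetD l i ' ']) ([] : List Char)
    String.ofList ('0' :: 'b' :: trimmedString)
  else
    match PySem.Int.ofStrBase? val 2 with
    | some n => String.ofList (padIntTo32BitsChars n)
    | none => ""   -- int(val, 2) raises ValueError here; excluded by Pre_

-- ===== PORT B =====
-- Source B: "0b" + val[-32:] for len(val) > 34, else "0b" + bin(int(val, 2))[2:].zfill(32)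
def trimTo32Bits_alt (val : String) : String :=
  if (val.toList.length : Int) > 34 then
    String.ofList ('0' :: 'b' :: PySem.List.slice val.toList (some (-32)) none)
  else
    match PySem.Int.ofStrBase? val 2 with
    | some n => String.ofList ('0' :: 'b' ::
        PySem.Chars.zfill (PySem.List.slice (PySem.Int.toBinChars0b n) (some 2) none) 32)
    | none => ""   -- int(val, 2) raises ValueError here; excluded by Pre_

-- ===== PRECONDITION & SPEC =====
-- Pre_ excludes exactly the inputs on which A raises ValueError: strings of length ≤ 34
-- that int(val, 2) rejects (the long branch never parses, so long strings are all admitted).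
def Pre_trimTo32Bits (val : String) : Prop :=
  34 < val.toList.length ∨ PySem.Int.ofStrBase? val 2 ≠ none
instance (val : String) : Decidable (Pre_trimTo32Bits val) := by
  unfold Pre_trimTo32Bits; infer_instance

def pvWitness_trimTo32Bits : String := "101"

def Spec_trimTo32Bits (val : String) (out : String) : Prop := out = trimTo32Bits_alt val
instance (val : String) (out : String) : Decidable (Spec_trimTo32Bits val out) := by
  unfold Spec_trimTo32Bits; infer_instance

-- ===== CLAIM (what is proved, stated in full; the proofs are below) =====
def Claim_equal_trimTo32Bits : Prop := ∀ (val : String), Dom_trimTo32Bits val →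
  Pre_trimTo32Bits val → Spec_trimTo32Bits val (trimTo32Bits val)

-- ===== LEMMAS AND PROOFS =====

-- the index-copy loop reads out a suffix
lemma pvFoldRead (l : List Char) (a : Nat) (s0 : List Char) :
    (PySem.List.pyRange (a : Int) (l.length : Int) 1).foldl
      (fun s i => s ++ [PySem.List.pyGetD l i ' ']) s0 = s0 ++ l.drop a := by
  rw [PySem.List.pyRange_one, List.foldl_map, PySem.List.foldl_append_singleton_eq_map]
  congr 1
  apply List.ext_getElem
  · simp only [List.length_map, List.length_range, List.length_drop]
    omega
  · intro i h1 h2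
    have hia : a + i < l.length := by
      simp only [List.length_drop] at h2; omega
    simp only [List.getElem_map, List.getElem_range, List.getElem_drop]
    rw [show ((a : Int) + (i : Int)) = ((a + i : Nat) : Int) by push_cast; ring,
      PySem.List.pyGetD_of_nonneg _ _ (by positivity)]
    have ht : ((a + i : Nat) : Int).toNat = a + i := by omega
    rw [ht, List.getD_eq_getElem?_getD, List.getElem?_eq_getElem hia]
    rfl

-- the zero-padding loop builds a replicate
lemma pvFoldZeros (k : Int) :
    (PySem.List.pyRange 0 k 1).foldl (fun s _ => s ++ ['0']) ([] : List Char) =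
      List.replicate k.toNat '0' := by
  rw [PySem.List.pyRange_one]
  rw [List.foldl_map, show (fun (s : List Char) (x : Nat) => s ++ ['0']) =
    (fun s x => s ++ [(fun (_ : Nat) => '0') x]) from rfl,
    PySem.List.foldl_append_singleton_eq_map]
  simp [List.map_const']

-- A's padding helper in closed form: pad bin(data) without its '0b' prefix to the left
lemma pvPad_closed (data : Int) :
    padIntTo32BitsChars data =
      '0' :: 'b' :: (List.replicate ((34 : Int) - ((PySem.Int.toBinChars0b data).length : Int)).toNat '0'
        ++ (PySem.Int.toBinChars0b data).drop 2) := by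
  simp only [padIntTo32BitsChars]
  rw [show ((2 : Int)) = ((2 : Nat) : Int) by norm_num, pvFoldRead, pvFoldZeros]

-- zfill to 32 of a list that does not start with a sign is a left zero-pad
lemma pvZfill32 (cs : List Char) (h : ∀ c ∈ cs.head?, c ≠ '+' ∧ c ≠ '-') :
    PySem.Chars.zfill cs 32 = List.replicate (32 - cs.length) '0' ++ cs := by
  by_cases h32 : (32 : Int) ≤ (cs.length : Int)
  · have hz : 32 - cs.length = 0 := by omega
    simp [PySem.Chars.zfill, h32, hz]
  · cases cs with
    | nil => simp [PySem.Chars.zfill]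
    | cons c r =>
        have hc := h c (by simp)
        simp only [PySem.Chars.zfill]
        rw [if_neg h32, if_neg (by simp [hc.1, hc.2])]
        simp

-- bin(n) has at least the two characters of its '0b' prefix
lemma pvBin_len (n : Int) : 2 ≤ (PySem.Int.toBinChars0b n).length := by
  simp only [PySem.Int.toBinChars0b]
  split <;> simp

-- the character after bin(n)'s '0b' prefix is a binary digit or the 'b' of '-0b'
lemma pvBin_drop_head (n : Int) :
    ∀ c ∈ ((PySem.Int.toBinChars0b n).drop 2).head?, c ≠ '+' ∧ c ≠ '-' := by
  intro c hc
  simp only [PySem.Int.toBinChars0b] at hc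
  split at hc
  · -- '-' :: '0' :: 'b' :: digits, dropping 2 leaves 'b' :: digits
    simp only [List.drop_succ_cons, List.drop_zero, List.head?_cons, Option.mem_def,
      Option.some.injEq] at hc
    subst hc
    exact ⟨by decide, by decide⟩
  · -- '0' :: 'b' :: digits, dropping 2 leaves the digits
    simp only [List.drop_succ_cons, List.drop_zero] at hc
    have hmem : c ∈ Nat.toDigits 2 n.toNat := List.mem_of_mem_head? hc
    have hdig : c.isDigit := Nat.isDigit_of_mem_toDigits (by norm_num) (by norm_num) hmem
    constructor <;> rintro rfl <;> simp [Char.isDigit] at hdig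

-- the short (parsing) branches of A and B agree for every parsed value
lemma pvShort_eq (n : Int) :
    padIntTo32BitsChars n =
      '0' :: 'b' :: PySem.Chars.zfill (PySem.List.slice (PySem.Int.toBinChars0b n) (some 2) none) 32 := by
  have hsl : PySem.List.slice (PySem.Int.toBinChars0b n) (some 2) none =
      (PySem.Int.toBinChars0b n).drop 2 := by
    rw [show ((2 : Int)) = ((2 : Nat) : Int) by norm_num, PySem.List.slice_from_natCast]
  rw [hsl, pvPad_closed, pvZfill32 _ (pvBin_drop_head n)]
  have hlen := pvBin_len n
  congr 4
  simp only [List.length_drop]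
  omega

-- the long branch: both sides return the last 32 characters
lemma pvLong_branch (val : String) (h : 34 < val.toList.length) :
    trimTo32Bits val = trimTo32Bits_alt val := by
  have hsl : PySem.List.slice val.toList (some (-32)) none =
      val.toList.drop (val.toList.length - 32) :=
    PySem.List.slice_from_neg_ofNat val.toList 32 (by norm_num)
  simp only [trimTo32Bits, trimTo32Bits_alt, hsl]
  rw [if_pos (by omega), if_pos (by omega)]
  rw [show ((val.toList.length : Int) - 34 + 2) = ((val.toList.length - 32 : Nat) : Int) by
    omega]
  rw [pvFoldRead]
  rw [List.nil_append]

-- ===== VERDICT (by name: the statement is the Claim_ definition above) =====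
theorem trimTo32Bits_spec : Claim_equal_trimTo32Bits := by
  intro val _ hpre
  show trimTo32Bits val = trimTo32Bits_alt val
  rcases Nat.lt_or_ge 34 val.toList.length with hgt | hle
  · exact pvLong_branch val hgt
  · rcases hpre with h | hparse
    · omega
    · obtain ⟨n, hn⟩ := Option.ne_none_iff_exists'.mp hparse
      simp only [trimTo32Bits, trimTo32Bits_alt]
      rw [if_neg (by omega), if_neg (by omega), hn]
      show String.ofList (padIntTo32BitsChars n) = String.ofList ('0' :: 'b' ::
        PySem.Chars.zfill (PySem.List.slice (PySem.Int.toBinChars0b n) (some 2) none) 32)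
      rw [pvShort_eq]
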